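-- pv_equiv track=rewrite | github.com/kaizensoze/project-euler | src/96.py | getNextVal
-- ===== SOURCE A (Python) =====
-- def getNextVal(puzzle,i,j,currVal):
--     available = set([str(x) for x in range(1,9+1)])
--
--     # check row
--     row = set([x for x in puzzle[i]])
--     row = row.difference(set(['0']))
--
--     # check col
--     col = []
--     for x in puzzle:
--         col.append(x[j])
--     col = set(col)
--     col = col.difference(set(['0']))
--
--     # check square
--     square = []
--     if i % 3 == 0:
--         for x in range(i+0, i+2+1):
--             if j % 3 == 0:
--                 for y in range(j+0, j+2+1):
--                     square.append(puzzle[x][y])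
--             elif j % 3 == 1:
--                 for y in range(j-1, j+1+1):
--                     square.append(puzzle[x][y])
--             elif j % 3 == 2:
--                 for y in range(j-2, j+1):
--                     square.append(puzzle[x][y])
--     elif i % 3 == 1:
--         for x in range(i-1, i+1+1):
--             if j % 3 == 0:
--                 for y in range(j+0, j+2+1):
--                     square.append(puzzle[x][y])
--             elif j % 3 == 1:
--                 for y in range(j-1, j+1+1):
--                     square.append(puzzle[x][y])
--             elif j % 3 == 2:
--                 for y in range(j-2, j+1):
--                     square.append(puzzle[x][y])
--     elif i % 3 == 2:
--         for x in range(i-2, i+1):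
--             if j % 3 == 0:
--                 for y in range(j+0, j+2+1):
--                     square.append(puzzle[x][y])
--             elif j % 3 == 1:
--                 for y in range(j-1, j+1+1):
--                     square.append(puzzle[x][y])
--             elif j % 3 == 2:
--                 for y in range(j-2, j+1):
--                     square.append(puzzle[x][y])
--     square = set(square)
--     square = square.difference(set(['0']))
--
--     available = available.difference(row)
--     available = available.difference(col)
--     available = available.difference(square)
--     available = available.difference(set([str(x) for x in range(1,int(currVal)+1)]))
--
--     available = sorted(list(available))
--
--     if len(available) == 0:
--         return None
--     else:
--         return available[0]
-- ===== SOURCE B (Python) =====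
-- def getNextVal(puzzle, i, j, currVal):
--     br = i - i % 3
--     bc = j - j % 3
--     d = int(currVal) + 1
--     if d < 1:
--         d = 1
--     while d <= 9:
--         s = str(d)
--         if (s not in puzzle[i]
--                 and all(row[j] != s for row in puzzle)
--                 and all(puzzle[x][y] != s
--                         for x in range(br, br + 3) for y in range(bc, bc + 3))):
--             return s
--         d += 1
--     return None
-- ===== Notes on version B (the rewrite author's own statement) =====
-- stated objective: simpler
-- what changed: A builds the full set of available digits (row/column/box sets, four set differences, sort, take first); B builds no collection at all: it probes candidate digits upward from int(currVal)+1 and returns the first one not hit by a direct scan of the row, the column and the arithmetically-located 3x3 box, replacing A's unrolled i%3/j%3 branch ladder.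
import Mathlib
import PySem

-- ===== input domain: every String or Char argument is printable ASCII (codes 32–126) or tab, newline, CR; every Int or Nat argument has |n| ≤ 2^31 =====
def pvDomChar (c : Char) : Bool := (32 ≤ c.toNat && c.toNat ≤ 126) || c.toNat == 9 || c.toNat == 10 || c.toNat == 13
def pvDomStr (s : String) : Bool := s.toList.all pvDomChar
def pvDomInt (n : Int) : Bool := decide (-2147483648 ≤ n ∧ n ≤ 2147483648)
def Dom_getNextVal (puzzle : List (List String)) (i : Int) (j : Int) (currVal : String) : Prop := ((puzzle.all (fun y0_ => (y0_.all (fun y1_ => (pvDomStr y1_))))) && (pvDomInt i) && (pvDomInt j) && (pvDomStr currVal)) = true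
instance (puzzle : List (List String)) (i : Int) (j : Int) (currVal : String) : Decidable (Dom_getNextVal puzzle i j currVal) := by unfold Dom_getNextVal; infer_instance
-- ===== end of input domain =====

-- B replaces A's "build the set of available digits by set differences, sort it, take the first"
-- with a forward probe: it tries the candidate digits just above int(currVal) in increasing order
-- and returns the first one not hit anywhere in the row, column or box — no sets, no sorting (objective: simpler).

-- puzzle[x][y] (both ports render Python's double indexing this way; none = IndexError)
def pvCell? (puzzle : List (List String)) (x y : Int) : Option String :=
  (PySem.List.pyGet? puzzle x).bind (fun r => PySem.List.pyGet? r y)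

-- ===== PORT A =====
-- the x-range of A's unrolled square scan (the if/elif ladder on i % 3)
def pvXs (i : Int) : List Int :=
  if PySem.Int.mod i 3 == 0 then PySem.List.pyRange (i+0) (i+2+1)
  else if PySem.Int.mod i 3 == 1 then PySem.List.pyRange (i-1) (i+1+1)
  else if PySem.Int.mod i 3 == 2 then PySem.List.pyRange (i-2) (i+1)
  else []

-- the y-range of A's inner if/elif ladder on j % 3
def pvYs (j : Int) : List Int :=
  if PySem.Int.mod j 3 == 0 then PySem.List.pyRange (j+0) (j+2+1)
  else if PySem.Int.mod j 3 == 1 then PySem.List.pyRange (j-1) (j+1+1)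
  else if PySem.Int.mod j 3 == 2 then PySem.List.pyRange (j-2) (j+1)
  else []

-- A's 'square' accumulation loop (appends puzzle[x][y]; none as soon as an index raises)
def pvSquare? (puzzle : List (List String)) (i j : Int) : Option (List String) :=
  (pvXs i).foldl
    (fun a x => (pvYs j).foldl
      (fun a2 y => a2.bind (fun l => (pvCell? puzzle x y).map (fun v => l ++ [v]))) a)
    (some [])

def getNextVal (puzzle : List (List String)) (i : Int) (j : Int) (currVal : String) : Option String :=
  let available : PySem.Set String := PySem.Set.ofList ((PySem.List.pyRange 1 (9+1)).map PySem.Int.toStr)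
  match PySem.List.pyGet? puzzle i with
  | none => none
  | some rowi =>
    let row := PySem.Set.diff (PySem.Set.ofList rowi) (PySem.Set.ofList ["0"])
    match puzzle.foldl (fun a x => a.bind (fun l => (PySem.List.pyGet? x j).map (fun v => l ++ [v]))) (some ([] : List String)) with
    | none => none
    | some colL =>
      let col := PySem.Set.diff (PySem.Set.ofList colL) (PySem.Set.ofList ["0"])
      match pvSquare? puzzle i j with
      | none => none
      | some sqL =>
        let square := PySem.Set.diff (PySem.Set.ofList sqL) (PySem.Set.ofList ["0"])
        match PySem.Int.ofStr? currVal with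
        | none => none
        | some c =>
          let a1 := PySem.Set.diff available row
          let a2 := PySem.Set.diff a1 col
          let a3 := PySem.Set.diff a2 square
          let a4 := PySem.Set.diff a3 (PySem.Set.ofList ((PySem.List.pyRange 1 (c+1)).map PySem.Int.toStr))
          let avail := PySem.List.sorted a4 (fun x => x)
          if avail.length == 0 then none else PySem.List.pyGet? avail 0

-- ===== PORT B =====
-- candidate digit s is legal: not in the row, the column or the 3×3 box
def pvOk (puzzle : List (List String)) (i j br bc : Int) (s : String) : Bool :=
  (match PySem.List.pyGet? puzzle i with
   | some rowi => !(rowi.contains s)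
   | none => false)
  && puzzle.all (fun r => !(PySem.List.pyGet? r j == some s))
  && (PySem.List.pyRange br (br+3)).all (fun x =>
       (PySem.List.pyRange bc (bc+3)).all (fun y =>
         !(pvCell? puzzle x y == some s)))

-- B's while loop: first legal digit d ≤ 9, counting up
def pvScan (puzzle : List (List String)) (i j br bc d : Int) : Option String :=
  if d ≤ 9 then
    (if pvOk puzzle i j br bc (PySem.Int.toStr d) then some (PySem.Int.toStr d)
     else pvScan puzzle i j br bc (d+1))
  else none
termination_by (10 - d).toNat
decreasing_by omega

def getNextVal_alt (puzzle : List (List String)) (i : Int) (j : Int) (currVal : String) : Option String :=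
  let br := i - PySem.Int.mod i 3
  let bc := j - PySem.Int.mod j 3
  match PySem.Int.ofStr? currVal with
  | none => none
  | some c =>
    let d := c + 1
    let d := if d < 1 then 1 else d
    pvScan puzzle i j br bc d

-- ===== PRECONDITION & SPEC =====
-- Pre_ is exactly A's no-raise domain: currVal parses as an int (else ValueError) and every index
-- A touches — puzzle[i], each row's [j], and the nine box cells — is in Python range (else IndexError).
def Pre_getNextVal (puzzle : List (List String)) (i : Int) (j : Int) (currVal : String) : Prop :=
  (PySem.Int.ofStr? currVal).isSome = true ∧
  PySem.Raise.InRange puzzle.length i ∧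
  (∀ r ∈ puzzle, PySem.Raise.InRange r.length j) ∧
  (∀ x ∈ PySem.List.pyRange (i - PySem.Int.mod i 3) (i - PySem.Int.mod i 3 + 3),
     PySem.Raise.InRange puzzle.length x ∧
     ∀ y ∈ PySem.List.pyRange (j - PySem.Int.mod j 3) (j - PySem.Int.mod j 3 + 3),
       PySem.Raise.InRange ((PySem.List.pyGet? puzzle x).getD []).length y)
instance (puzzle : List (List String)) (i : Int) (j : Int) (currVal : String) : Decidable (Pre_getNextVal puzzle i j currVal) := by unfold Pre_getNextVal; infer_instance

def pvWitness_getNextVal : List (List String) × Int × Int × String :=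
  (List.replicate 9 (List.replicate 9 "0"), 0, 0, "0")

def Spec_getNextVal (puzzle : List (List String)) (i : Int) (j : Int) (currVal : String) (out : Option String) : Prop := out = getNextVal_alt puzzle i j currVal
instance (puzzle : List (List String)) (i : Int) (j : Int) (currVal : String) (out : Option String) : Decidable (Spec_getNextVal puzzle i j currVal out) := by unfold Spec_getNextVal; infer_instance

-- ===== CLAIM (what is proved, stated in full; the proofs are below) =====
def Claim_equal_getNextVal : Prop := ∀ (puzzle : List (List String)) (i : Int) (j : Int) (currVal : String), Dom_getNextVal puzzle i j currVal → Pre_getNextVal puzzle i j currVal → Spec_getNextVal puzzle i j currVal (getNextVal puzzle i j currVal)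

-- ===== LEMMAS AND PROOFS =====

lemma pvRange3 (a : Int) : PySem.List.pyRange a (a+3) = [a, a+1, a+2] := by
  have h1 : PySem.List.pyRange (a+1+1+1) (a+3) = [] :=
    List.eq_nil_of_length_eq_zero (by rw [PySem.List.length_pyRange_one]; omega)
  rw [PySem.List.pyRange_one_cons (by omega), PySem.List.pyRange_one_cons (by omega),
      PySem.List.pyRange_one_cons (by omega), h1]
  norm_num
  omega

lemma pvXs_eq (i : Int) : pvXs i = [i - PySem.Int.mod i 3, i - PySem.Int.mod i 3 + 1, i - PySem.Int.mod i 3 + 2] := by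
  have h0 : 0 ≤ PySem.Int.mod i 3 := PySem.Int.mod_nonneg _ (by norm_num)
  have h3 : PySem.Int.mod i 3 < 3 := PySem.Int.mod_lt _ (by norm_num)
  rcases (show PySem.Int.mod i 3 = 0 ∨ PySem.Int.mod i 3 = 1 ∨ PySem.Int.mod i 3 = 2 by omega) with h | h | h
  · rw [pvXs, if_pos (by rw [h]; decide),
      show i + 0 = i - PySem.Int.mod i 3 by omega,
      show i + 2 + 1 = (i - PySem.Int.mod i 3) + 3 by omega, pvRange3]
  · rw [pvXs, if_neg (by rw [h]; decide), if_pos (by rw [h]; decide),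
      show i - 1 = i - PySem.Int.mod i 3 by omega,
      show i + 1 + 1 = (i - PySem.Int.mod i 3) + 3 by omega, pvRange3]
  · rw [pvXs, if_neg (by rw [h]; decide), if_neg (by rw [h]; decide), if_pos (by rw [h]; decide),
      show i - 2 = i - PySem.Int.mod i 3 by omega,
      show i + 1 = (i - PySem.Int.mod i 3) + 3 by omega, pvRange3]

lemma pvYs_eq (j : Int) : pvYs j = [j - PySem.Int.mod j 3, j - PySem.Int.mod j 3 + 1, j - PySem.Int.mod j 3 + 2] := by
  have h0 : 0 ≤ PySem.Int.mod j 3 := PySem.Int.mod_nonneg _ (by norm_num)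
  have h3 : PySem.Int.mod j 3 < 3 := PySem.Int.mod_lt _ (by norm_num)
  rcases (show PySem.Int.mod j 3 = 0 ∨ PySem.Int.mod j 3 = 1 ∨ PySem.Int.mod j 3 = 2 by omega) with h | h | h
  · rw [pvYs, if_pos (by rw [h]; decide),
      show j + 0 = j - PySem.Int.mod j 3 by omega,
      show j + 2 + 1 = (j - PySem.Int.mod j 3) + 3 by omega, pvRange3]
  · rw [pvYs, if_neg (by rw [h]; decide), if_pos (by rw [h]; decide),
      show j - 1 = j - PySem.Int.mod j 3 by omega,
      show j + 1 + 1 = (j - PySem.Int.mod j 3) + 3 by omega, pvRange3]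
  · rw [pvYs, if_neg (by rw [h]; decide), if_neg (by rw [h]; decide), if_pos (by rw [h]; decide),
      show j - 2 = j - PySem.Int.mod j 3 by omega,
      show j + 1 = (j - PySem.Int.mod j 3) + 3 by omega, pvRange3]

lemma pvFoldOptAppend {α : Type} (f : α → Option String) :
    ∀ (l : List α) (acc : List String), (∀ x ∈ l, (f x).isSome = true) →
    l.foldl (fun a x => a.bind (fun t => (f x).map (fun v => t ++ [v]))) (some acc)
      = some (acc ++ l.map (fun x => (f x).getD "")) := by
  intro l
  induction l with
  | nil => intro acc _; simp
  | cons x t ih =>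
    intro acc h
    obtain ⟨v, hv⟩ := Option.isSome_iff_exists.mp (h x (by simp))
    rw [List.foldl_cons]
    have hstep : (Option.bind (some acc) (fun t' => (f x).map (fun v => t' ++ [v]))) = some (acc ++ [v]) := by
      simp [hv]
    rw [hstep, ih (acc ++ [v]) (fun y hy => h y (List.mem_cons_of_mem _ hy))]
    simp [hv]

lemma pvScan_eq (puzzle : List (List String)) (i j br bc : Int) :
    ∀ (n : Nat) (d : Int), (10 - d).toNat ≤ n →
    pvScan puzzle i j br bc d
      = (((PySem.List.pyRange d 10).filter (fun k => pvOk puzzle i j br bc (PySem.Int.toStr k))).map PySem.Int.toStr).head? := by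
  intro n
  induction n with
  | zero =>
    intro d hd
    have h9 : ¬ d ≤ 9 := by omega
    have hnil : PySem.List.pyRange d 10 = [] :=
      List.eq_nil_of_length_eq_zero (by rw [PySem.List.length_pyRange_one]; omega)
    rw [pvScan, if_neg h9, hnil]
    rfl
  | succ n ih =>
    intro d _
    by_cases h9 : d ≤ 9
    · rw [pvScan, if_pos h9, PySem.List.pyRange_one_cons (by omega : d < 10)]
      by_cases hok : pvOk puzzle i j br bc (PySem.Int.toStr d) = true
      · rw [if_pos hok]
        simp [hok]
      · rw [if_neg hok, ih (d+1) (by omega)]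
        simp [hok]
    · have hnil : PySem.List.pyRange d 10 = [] :=
        List.eq_nil_of_length_eq_zero (by rw [PySem.List.length_pyRange_one]; omega)
      rw [pvScan, if_neg h9, hnil]
      rfl

lemma pvRangeCut (d0 : Int) (h1 : 1 ≤ d0) :
    (PySem.List.pyRange 1 10).filter (fun k => decide (d0 ≤ k)) = PySem.List.pyRange d0 10 := by
  by_cases h10 : 10 ≤ d0
  · have hnil : PySem.List.pyRange d0 10 = [] :=
      List.eq_nil_of_length_eq_zero (by rw [PySem.List.length_pyRange_one]; omega)
    rw [hnil]
    apply List.filter_eq_nil_iff.mpr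
    intro k hk
    have hb := PySem.List.mem_pyRange_one.mp hk
    simp only [decide_eq_true_eq]
    omega
  · by_cases h1' : d0 ≤ 1
    · have he : d0 = 1 := by omega
      subst he
      apply List.filter_eq_self.mpr
      intro k hk
      have hb := PySem.List.mem_pyRange_one.mp hk
      simp only [decide_eq_true_eq]
      omega
    · have h2 : 2 ≤ d0 := by omega
      have h9 : d0 ≤ 9 := by omega
      interval_cases d0 <;> decide

lemma pvToStr_inj9 (m k : Int) (hm : 1 ≤ m ∧ m ≤ 9) (hk : 1 ≤ k ∧ k ≤ 9)
    (h : PySem.Int.toStr m = PySem.Int.toStr k) : m = k := by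
  obtain ⟨hm1, hm2⟩ := hm; obtain ⟨hk1, hk2⟩ := hk
  interval_cases m <;> interval_cases k <;> simp_all <;> revert h <;> decide

lemma pvToStr_ne_zero (k : Int) (hk : 1 ≤ k ∧ k ≤ 9) : PySem.Int.toStr k ≠ "0" := by
  obtain ⟨hk1, hk2⟩ := hk; interval_cases k <;> decide

lemma pvMemLow (k c : Int) (hk : 1 ≤ k ∧ k ≤ 9) :
    PySem.Int.toStr k ∈ (PySem.List.pyRange 1 (c+1)).map PySem.Int.toStr ↔ (1 ≤ k ∧ k ≤ c) := by
  constructor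
  · intro hmem
    rcases List.mem_map.mp hmem with ⟨m, hm, he⟩
    have hmr := PySem.List.mem_pyRange_one.mp hm
    by_cases hc9 : c ≤ 9
    · have : m = k := pvToStr_inj9 m k ⟨hmr.1, by omega⟩ hk he
      omega
    · omega
  · rintro ⟨h1, h2⟩
    exact List.mem_map.mpr ⟨k, PySem.List.mem_pyRange_one.mpr ⟨h1, by omega⟩, rfl⟩

lemma pvIfHead (l : List String) :
    (if l.length == 0 then none else PySem.List.pyGet? l 0) = l.head? := by
  cases l with
  | nil => rfl
  | cons a t => simp

lemma pvGetSome {α : Type} (xs : List α) (t : Int) (ht : PySem.Raise.InRange xs.length t) :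
    ∃ v, PySem.List.pyGet? xs t = some v := by
  rcases hE : PySem.List.pyGet? xs t with _ | v
  · rw [PySem.List.pyGet?_eq_none_iff] at hE
    exact absurd ht hE
  · exact ⟨v, rfl⟩

lemma pvColFold (puzzle : List (List String)) (j : Int)
    (h : ∀ r ∈ puzzle, (PySem.List.pyGet? r j).isSome = true) :
    puzzle.foldl (fun a x => a.bind (fun l => (PySem.List.pyGet? x j).map (fun v => l ++ [v]))) (some ([] : List String))
      = some ([] ++ puzzle.map (fun r => (PySem.List.pyGet? r j).getD "")) :=
  pvFoldOptAppend _ puzzle [] h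

-- ===== VERDICT (by name: the statement is the Claim_ definition above) =====
theorem getNextVal_spec : Claim_equal_getNextVal := by
  intro puzzle i j currVal _ hpre
  obtain ⟨hcv, hiR, hcolR, hsqR⟩ := hpre
  obtain ⟨c, hc⟩ := Option.isSome_iff_exists.mp hcv
  unfold Spec_getNextVal
  obtain ⟨rowi, hrowi⟩ := pvGetSome puzzle i hiR
  have hcolSome : ∀ r ∈ puzzle, (PySem.List.pyGet? r j).isSome = true := by
    intro r hr
    obtain ⟨v, hv⟩ := pvGetSome r j (hcolR r hr)
    simp [hv]
  have hcolL := pvColFold puzzle j hcolSome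
  simp only [pvRange3] at hsqR
  have hcellSome : ∀ x ∈ [i - PySem.Int.mod i 3, i - PySem.Int.mod i 3 + 1, i - PySem.Int.mod i 3 + 2],
      ∀ y ∈ [j - PySem.Int.mod j 3, j - PySem.Int.mod j 3 + 1, j - PySem.Int.mod j 3 + 2],
      (pvCell? puzzle x y).isSome = true := by
    intro x hx y hy
    obtain ⟨hxR, hyR⟩ := hsqR x hx
    obtain ⟨r, hr⟩ := pvGetSome puzzle x hxR
    have hyR' := hyR y hy
    rw [hr] at hyR'
    simp only [Option.getD_some] at hyR'
    obtain ⟨v, hv⟩ := pvGetSome r y hyR'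
    simp [pvCell?, hr, hv]
  obtain ⟨w1, e1⟩ := Option.isSome_iff_exists.mp (hcellSome (i - PySem.Int.mod i 3) (by simp) (j - PySem.Int.mod j 3) (by simp))
  obtain ⟨w2, e2⟩ := Option.isSome_iff_exists.mp (hcellSome (i - PySem.Int.mod i 3) (by simp) (j - PySem.Int.mod j 3 + 1) (by simp))
  obtain ⟨w3, e3⟩ := Option.isSome_iff_exists.mp (hcellSome (i - PySem.Int.mod i 3) (by simp) (j - PySem.Int.mod j 3 + 2) (by simp))
  obtain ⟨w4, e4⟩ := Option.isSome_iff_exists.mp (hcellSome (i - PySem.Int.mod i 3 + 1) (by simp) (j - PySem.Int.mod j 3) (by simp))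
  obtain ⟨w5, e5⟩ := Option.isSome_iff_exists.mp (hcellSome (i - PySem.Int.mod i 3 + 1) (by simp) (j - PySem.Int.mod j 3 + 1) (by simp))
  obtain ⟨w6, e6⟩ := Option.isSome_iff_exists.mp (hcellSome (i - PySem.Int.mod i 3 + 1) (by simp) (j - PySem.Int.mod j 3 + 2) (by simp))
  obtain ⟨w7, e7⟩ := Option.isSome_iff_exists.mp (hcellSome (i - PySem.Int.mod i 3 + 2) (by simp) (j - PySem.Int.mod j 3) (by simp))
  obtain ⟨w8, e8⟩ := Option.isSome_iff_exists.mp (hcellSome (i - PySem.Int.mod i 3 + 2) (by simp) (j - PySem.Int.mod j 3 + 1) (by simp))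
  obtain ⟨w9, e9⟩ := Option.isSome_iff_exists.mp (hcellSome (i - PySem.Int.mod i 3 + 2) (by simp) (j - PySem.Int.mod j 3 + 2) (by simp))
  have hsq : pvSquare? puzzle i j
      = some (([i - PySem.Int.mod i 3, i - PySem.Int.mod i 3 + 1, i - PySem.Int.mod i 3 + 2]).flatMap
          (fun x => ([j - PySem.Int.mod j 3, j - PySem.Int.mod j 3 + 1, j - PySem.Int.mod j 3 + 2]).map
            (fun y => (pvCell? puzzle x y).getD ""))) := by
    rw [pvSquare?, pvXs_eq, pvYs_eq]
    simp only [List.foldl_cons, List.foldl_nil]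
    simp only [List.flatMap_cons, List.flatMap_nil, List.map_cons, List.map_nil, List.append_nil,
      List.nil_append, List.cons_append]
    rw [e1, e2, e3, e4, e5, e6, e7, e8, e9]
    simp
  unfold getNextVal getNextVal_alt
  simp only [hrowi, hcolL, hsq, hc, List.nil_append]
  have hL9 : PySem.Set.ofList (List.map PySem.Int.toStr (PySem.List.pyRange 1 (9+1)))
      = List.map PySem.Int.toStr (PySem.List.pyRange 1 (9+1)) :=
    PySem.Set.ofList_eq_self_of_nodup _ (by decide)
  have hpair9 : List.Pairwise (· < ·) (List.map PySem.Int.toStr (PySem.List.pyRange 1 (9+1))) := by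
    have h : List.Pairwise (fun a b : String => a.toList < b.toList)
        (List.map PySem.Int.toStr (PySem.List.pyRange 1 (9+1))) := by decide
    exact h.imp (fun hab => String.lt_iff_toList_lt.mpr hab)
  simp only [hL9, PySem.Set.diff, List.filter_filter]
  rw [PySem.List.sorted_eq_self_of_pairwise _ _
    ((List.Pairwise.sublist List.filter_sublist hpair9).imp (fun h => le_of_lt h))]
  rw [pvIfHead]
  rw [pvScan_eq puzzle i j _ _ ((10 - (if c + 1 < 1 then 1 else c + 1)).toNat) _ (le_refl _)]
  rw [List.filter_map]
  have hR10 : PySem.List.pyRange 1 (9+1) = PySem.List.pyRange 1 10 := by norm_num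
  have hd01 : (1 : Int) ≤ (if c + 1 < 1 then 1 else c + 1) := by split <;> omega
  rw [hR10, ← pvRangeCut _ hd01, List.filter_filter]
  congr 1
  congr 1
  apply List.filter_congr
  intro k hk
  obtain ⟨hk1, hk2⟩ := PySem.List.mem_pyRange_one.mp hk
  have hne0 : PySem.Int.toStr k ≠ "0" := pvToStr_ne_zero k ⟨hk1, by omega⟩
  have hlow := pvMemLow k c ⟨hk1, by omega⟩
  have h00 : PySem.Set.ofList ["0"] = ["0"] := by decide
  simp at e1 e2 e3 e4 e5 e6 e7 e8 e9
  rw [Bool.eq_iff_iff]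
  simp [pvOk, hrowi, pvRange3, h00, e1, e2, e3, e4, e5, e6, e7, e8, e9]
  constructor
  · rintro ⟨hlowF, hsqF, hcolF, hrowF⟩
    rcases hsqF with hsqF | h0; swap; · exact absurd h0 hne0
    rcases hcolF with hcolF | h0; swap; · exact absurd h0 hne0
    rcases hrowF with hrowF | h0; swap; · exact absurd h0 hne0
    obtain ⟨s1, s2, s3, s4, s5, s6, s7, s8, s9⟩ := hsqF
    have hck : c < k := by
      by_contra hle
      exact hlowF k hk1 (by omega) rfl
    refine ⟨⟨⟨hrowF, ?_⟩, ⟨fun h => s1 h.symm, fun h => s2 h.symm, fun h => s3 h.symm⟩,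
      ⟨fun h => s4 h.symm, fun h => s5 h.symm, fun h => s6 h.symm⟩,
      fun h => s7 h.symm, fun h => s8 h.symm, fun h => s9 h.symm⟩, ?_⟩
    · intro x hx heq
      have hg := hcolF x hx
      exact hg (by rw [heq]; rfl)
    · split <;> omega
  · rintro ⟨⟨⟨hrowB, hcolB⟩, ⟨hs1, hs2, hs3⟩, ⟨hs4, hs5, hs6⟩, hs7, hs8, hs9⟩, hd0⟩
    have hck : c < k := by
      by_cases h0' : c < 0
      · omega
      · rw [if_neg h0'] at hd0; omega
    refine ⟨?_, Or.inl ⟨fun h => hs1 h.symm, fun h => hs2 h.symm, fun h => hs3 h.symm,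
      fun h => hs4 h.symm, fun h => hs5 h.symm, fun h => hs6 h.symm,
      fun h => hs7 h.symm, fun h => hs8 h.symm, fun h => hs9 h.symm⟩, Or.inl ?_, Or.inl hrowB⟩
    · intro x h1x hxc heq
      have hxk : x = k := pvToStr_inj9 x k ⟨h1x, by omega⟩ ⟨hk1, by omega⟩ heq
      omega
    · intro x hx heq
      obtain ⟨w, hw⟩ := Option.isSome_iff_exists.mp (hcolSome x hx)
      rw [hw] at heq
      simp only [Option.getD_some] at heq
      exact hcolB x hx (by rw [hw, heq])
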